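-- pv_equiv track=rewrite | github.com/MMAThijssen/catfish | networks/process_results.py | count_bases
-- ===== SOURCE A (Python) =====
-- def count_bases(counter_tuple):
--     """
--     Counts the number of bases from Counter dict.
--
--     Args:
--         counter_tuple -- tuple (seq: count)
--
--     Returns: dict {A: count, C: count, G: count, T: count}
--     """
--     count_A = 0
--     count_C = 0
--     count_G = 0
--     count_T = 0
--
--     count_dict = {"A": count_A, "C": count_C, "G": count_G, "T": count_T}
--
--     for i in range(len(counter_tuple)):
--         for b in counter_tuple[i][0]:
--             count_dict[b] += counter_tuple[i][1]
--
--     return count_dict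
-- ===== SOURCE B (Python) =====
-- def count_bases(counter_tuple):
--     """
--     Counts the number of bases from Counter dict.
--
--     Returns: dict {A: count, C: count, G: count, T: count}
--     """
--     return {base: sum(count * seq.count(base) for seq, count in counter_tuple)
--             for base in "ACGT"}
-- ===== Notes on version B (the rewrite author's own statement) =====
-- stated objective: simpler
-- what changed: B replaces A's index loop with char-by-char dict increments by a dict comprehension of four closed-form weighted sums, one per base, using seq.count(base).
import Mathlib
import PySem

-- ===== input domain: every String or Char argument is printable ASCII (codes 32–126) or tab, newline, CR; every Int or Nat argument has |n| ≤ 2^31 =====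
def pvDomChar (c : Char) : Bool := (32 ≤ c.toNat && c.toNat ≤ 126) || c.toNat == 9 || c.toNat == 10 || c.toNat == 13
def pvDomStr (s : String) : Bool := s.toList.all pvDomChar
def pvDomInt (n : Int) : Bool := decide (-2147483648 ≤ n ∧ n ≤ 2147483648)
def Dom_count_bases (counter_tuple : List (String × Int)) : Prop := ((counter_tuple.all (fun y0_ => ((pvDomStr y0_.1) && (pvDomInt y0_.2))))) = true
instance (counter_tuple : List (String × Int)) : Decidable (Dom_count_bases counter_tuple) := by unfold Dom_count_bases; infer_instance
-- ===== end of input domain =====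

-- B replaces A's char-by-char dict increments with four closed-form per-base weighted sums (simpler decomposition).


-- ===== PORT A =====
-- literal port of A: a dict pre-seeded {"A":0,"C":0,"G":0,"T":0}, then for i in range(len),
-- for each char b of counter_tuple[i][0], count_dict[b] += counter_tuple[i][1].
-- Python raises KeyError when b is not one of A/C/G/T; those inputs are excluded by Pre_ below
-- (Dict.modify would silently insert there, so the port is exact only inside Pre_).
def count_bases (counter_tuple : List (String × Int)) : List (String × Int) :=
  let count_dict : PySem.Dict String Int := PySem.Dict.mk [("A", 0), ("C", 0), ("G", 0), ("T", 0)]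
  let final : PySem.Dict String Int :=
    (PySem.List.pyRange 0 (PySem.List.len counter_tuple) 1).foldl
      (fun d i =>
        (PySem.List.pyGetD counter_tuple i ("", 0)).1.toList.foldl
          (fun d b => d.modify (String.ofList [b]) 0
            (· + (PySem.List.pyGetD counter_tuple i ("", 0)).2)) d)
      count_dict
  final.items

-- ===== PORT B =====
-- literal port of B: {base: sum(count * seq.count(base) for seq, count in counter_tuple) for base in "ACGT"}
def count_bases_alt (counter_tuple : List (String × Int)) : List (String × Int) :=
  "ACGT".toList.map (fun base =>
    (String.ofList [base],
     (counter_tuple.map (fun p => p.2 * (PySem.Str.count p.1 (String.ofList [base]) : Int))).sum))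

-- ===== PRECONDITION & SPEC =====
-- Pre_ excludes exactly the inputs on which A raises KeyError: some sequence character outside "ACGT".
def Pre_count_bases (counter_tuple : List (String × Int)) : Prop :=
  (counter_tuple.all (fun p => p.1.toList.all (fun c => c == 'A' || c == 'C' || c == 'G' || c == 'T'))) = true
instance (counter_tuple : List (String × Int)) : Decidable (Pre_count_bases counter_tuple) := by
  unfold Pre_count_bases; infer_instance
def pvWitness_count_bases : (List (String × Int)) := [("ACGT", 2), ("GAT", 3)]

def Spec_count_bases (counter_tuple : List (String × Int)) (out : List (String × Int)) : Prop := out = count_bases_alt counter_tuple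
instance (counter_tuple : List (String × Int)) (out : List (String × Int)) : Decidable (Spec_count_bases counter_tuple out) := by unfold Spec_count_bases; infer_instance

-- ===== CLAIM (what is proved, stated in full; the proofs are below) =====
def Claim_equal_count_bases : Prop := ∀ (counter_tuple : List (String × Int)), Dom_count_bases counter_tuple → Pre_count_bases counter_tuple → Spec_count_bases counter_tuple (count_bases counter_tuple)

-- ===== LEMMAS AND PROOFS =====

-- the count_dict of A always has the shape {"A": a, "C": c, "G": g, "T": t}
def dict4 (a c g t : Int) : PySem.Dict String Int :=
  PySem.Dict.mk [("A", a), ("C", c), ("G", g), ("T", t)]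

theorem dict4_injEq (a c g t a' c' g' t' : Int) :
    dict4 a c g t = dict4 a' c' g' t' ↔ a = a' ∧ c = c' ∧ g = g' ∧ t = t' := by
  simp [dict4]

theorem modify4_A (a c g t : Int) (f : Int → Int) :
    (dict4 a c g t).modify (String.ofList ['A']) 0 f = dict4 (f a) c g t := by
  simp [dict4, PySem.Dict.modify, PySem.Dict.insert, PySem.Dict.getD, PySem.Dict.get?, PySem.Dict.contains]

theorem modify4_C (a c g t : Int) (f : Int → Int) :
    (dict4 a c g t).modify (String.ofList ['C']) 0 f = dict4 a (f c) g t := by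
  simp [dict4, PySem.Dict.modify, PySem.Dict.insert, PySem.Dict.getD, PySem.Dict.get?, PySem.Dict.contains]

theorem modify4_G (a c g t : Int) (f : Int → Int) :
    (dict4 a c g t).modify (String.ofList ['G']) 0 f = dict4 a c (f g) t := by
  simp [dict4, PySem.Dict.modify, PySem.Dict.insert, PySem.Dict.getD, PySem.Dict.get?, PySem.Dict.contains]

theorem modify4_T (a c g t : Int) (f : Int → Int) :
    (dict4 a c g t).modify (String.ofList ['T']) 0 f = dict4 a c g (f t) := by
  simp [dict4, PySem.Dict.modify, PySem.Dict.insert, PySem.Dict.getD, PySem.Dict.get?, PySem.Dict.contains]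

-- A's inner loop over the characters of one sequence
theorem innerA (l : List Char) (hl : ∀ c ∈ l, c = 'A' ∨ c = 'C' ∨ c = 'G' ∨ c = 'T')
    (n : Int) : ∀ (a c g t : Int),
    l.foldl (fun d b => d.modify (String.ofList [b]) 0 (· + n)) (dict4 a c g t)
      = dict4 (a + (l.count 'A' : Int) * n) (c + (l.count 'C' : Int) * n)
              (g + (l.count 'G' : Int) * n) (t + (l.count 'T' : Int) * n) := by
  induction l with
  | nil => intro a c g t; simp
  | cons x xs ih =>
    intro a c g t
    have hx := hl x (by simp)
    have hxs : ∀ c ∈ xs, c = 'A' ∨ c = 'C' ∨ c = 'G' ∨ c = 'T' := by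
      intro c hc; exact hl c (by simp [hc])
    rcases hx with h | h | h | h <;> subst h <;>
      simp only [List.foldl_cons, modify4_A, modify4_C, modify4_G, modify4_T, ih hxs] <;>
      rw [dict4_injEq] <;>
      refine ⟨?_, ?_, ?_, ?_⟩ <;> rw [List.count_cons] <;> norm_num <;> ring

-- A's outer loop over the (seq, count) pairs
theorem outerA (ct : List (String × Int))
    (h : ∀ p ∈ ct, ∀ c ∈ p.1.toList, c = 'A' ∨ c = 'C' ∨ c = 'G' ∨ c = 'T') :
    ∀ (a c g t : Int),
    ct.foldl (fun d p => p.1.toList.foldl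
        (fun d b => d.modify (String.ofList [b]) 0 (· + p.2)) d) (dict4 a c g t)
      = dict4 (a + (ct.map (fun p => p.2 * (p.1.toList.count 'A' : Int))).sum)
              (c + (ct.map (fun p => p.2 * (p.1.toList.count 'C' : Int))).sum)
              (g + (ct.map (fun p => p.2 * (p.1.toList.count 'G' : Int))).sum)
              (t + (ct.map (fun p => p.2 * (p.1.toList.count 'T' : Int))).sum) := by
  induction ct with
  | nil => intro a c g t; simp
  | cons p ps ih =>
    intro a c g t
    have hp : ∀ c ∈ p.1.toList, c = 'A' ∨ c = 'C' ∨ c = 'G' ∨ c = 'T' :=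
      h p (by simp)
    have hps : ∀ q ∈ ps, ∀ c ∈ q.1.toList, c = 'A' ∨ c = 'C' ∨ c = 'G' ∨ c = 'T' := by
      intro q hq; exact h q (by simp [hq])
    simp only [List.foldl_cons, innerA p.1.toList hp p.2, ih hps, List.map_cons,
      List.sum_cons, dict4_injEq]
    refine ⟨?_, ?_, ?_, ?_⟩ <;> ring

theorem count_go_single (c : Char) : ∀ (fuel : Nat) (l : List Char) (acc : Nat), l.length ≤ fuel →
    PySem.Chars.count.go [c] fuel l acc = acc + l.count c := by
  intro fuel
  induction fuel with
  | zero => intro l acc h; simp at h; simp [h, PySem.Chars.count.go]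
  | succ m ih =>
    intro l acc h
    cases l with
    | nil => simp [PySem.Chars.count.go]
    | cons x t =>
      simp only [PySem.Chars.count.go]
      by_cases hx : x = c
      · subst hx
        simp [List.isPrefixOf, ih t (acc + 1) (by simpa using h)]
        omega
      · simp [List.isPrefixOf, hx, ih t acc (by simpa using h), Ne.symm hx]

theorem count_single (s : List Char) (c : Char) : PySem.Chars.count s [c] = s.count c := by
  simp [PySem.Chars.count, count_go_single c s.length s 0 le_rfl]

-- ===== VERDICT (by name: the statement is the Claim_ definition above) =====
theorem count_bases_spec : Claim_equal_count_bases := by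
  intro ct _ hPre0
  have hPre : ∀ p ∈ ct, ∀ c ∈ p.1.toList, c = 'A' ∨ c = 'C' ∨ c = 'G' ∨ c = 'T' := by
    simp only [Pre_count_bases, List.all_eq_true, Bool.or_eq_true, beq_iff_eq] at hPre0
    intro p hp c hc
    have h2 := hPre0 p hp c hc
    tauto
  unfold Spec_count_bases count_bases
  have h1 : (PySem.List.pyRange 0 (PySem.List.len ct) 1).foldl
      (fun d i => (PySem.List.pyGetD ct i ("", 0)).1.toList.foldl
        (fun d b => d.modify (String.ofList [b]) 0
          (· + (PySem.List.pyGetD ct i ("", 0)).2)) d)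
      (dict4 0 0 0 0)
      = ct.foldl (fun d p => p.1.toList.foldl
          (fun d b => d.modify (String.ofList [b]) 0 (· + p.2)) d) (dict4 0 0 0 0) :=
    PySem.List.foldl_pyRange_zero_pyGetD ct ("", 0)
      (fun d p => p.1.toList.foldl (fun d b => d.modify (String.ofList [b]) 0 (· + p.2)) d)
      (dict4 0 0 0 0)
  show ((PySem.List.pyRange 0 (PySem.List.len ct) 1).foldl _ (dict4 0 0 0 0)).items
      = count_bases_alt ct
  rw [h1, outerA ct hPre]
  simp only [count_bases_alt, dict4, zero_add]
  simp [count_single]
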